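-- pv_equiv track=rewrite | github.com/app-sre/qontract-reconcile | reconcile/vault_replication.py | list_invalid_paths
-- ===== SOURCE A (Python) =====
-- from collections.abc import Iterable
--
-- def list_invalid_paths(
--     path_list: Iterable[str], policy_paths: Iterable[str]
-- ) -> list[str]:
--     """Returns a list of paths that are listed to be copied are not present in the policy
--     to fail the integration if we are trying to copy secrets that are not allowed."""
--
--     invalid_paths = []
--
--     for path in path_list:
--         if not _policy_contains_path(path, policy_paths):
--             invalid_paths.append(path)
--
--     return invalid_paths
--
-- def _policy_contains_path(path: str, policy_paths: Iterable[str]) -> bool: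
--     return any(path in p_path for p_path in policy_paths)
-- ===== SOURCE B (Python) =====
-- def list_invalid_paths(path_list, policy_paths):
--     """Returns a list of paths that are listed to be copied are not present in the policy
--     to fail the integration if we are trying to copy secrets that are not allowed."""
--     policies = list(policy_paths)
--     if not policies:
--         return list(path_list)
--     # "\x00" never occurs in vault paths, so a match cannot cross a boundary:
--     # one C-level substring search replaces the per-policy inner loop.
--     haystack = "\x00".join(policies)
--     return [path for path in path_list if path not in haystack]
-- ===== Notes on version B (the rewrite author's own statement) =====
-- stated objective: faster
-- what changed: B joins all policy paths once into a single haystack separated by '\x00' (a character outside the path alphabet) and replaces A's inner any()-loop over policies with one substring test per query path.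
import Mathlib
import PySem

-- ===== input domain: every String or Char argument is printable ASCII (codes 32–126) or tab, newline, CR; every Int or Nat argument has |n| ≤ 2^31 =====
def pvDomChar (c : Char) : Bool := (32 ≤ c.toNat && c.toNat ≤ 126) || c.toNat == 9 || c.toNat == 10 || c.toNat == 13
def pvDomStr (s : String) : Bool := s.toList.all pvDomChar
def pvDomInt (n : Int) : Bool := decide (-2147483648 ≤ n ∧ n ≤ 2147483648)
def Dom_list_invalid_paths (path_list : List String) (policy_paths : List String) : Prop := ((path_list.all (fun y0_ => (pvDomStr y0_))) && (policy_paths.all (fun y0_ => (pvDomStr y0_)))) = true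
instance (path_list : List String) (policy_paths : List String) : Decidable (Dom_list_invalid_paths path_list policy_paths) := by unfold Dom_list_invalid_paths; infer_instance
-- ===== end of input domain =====

-- B replaces A's per-path scan over all policy paths by one substring test against a single
-- '\x00'-joined haystack of the policy paths (faster by a constant factor, one pass to build).


-- ===== PORT A =====
def pvPolicyContainsPath (path : String) (policy_paths : List String) : Bool :=
  policy_paths.any (fun p_path => PySem.Str.isIn path p_path)

def list_invalid_paths (path_list : List String) (policy_paths : List String) : List String :=
  path_list.foldl
    (fun invalid_paths path =>
      if !(pvPolicyContainsPath path policy_paths) then invalid_paths ++ [path] else invalid_paths)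
    []

-- ===== PORT B =====
def list_invalid_paths_alt (path_list : List String) (policy_paths : List String) : List String :=
  if policy_paths.isEmpty then path_list
  else
    let haystack := PySem.Str.join "\x00" policy_paths
    path_list.filter (fun path => !(PySem.Str.isIn path haystack))

-- ===== PRECONDITION & SPEC =====
def Spec_list_invalid_paths (path_list : List String) (policy_paths : List String) (out : List String) : Prop := out = list_invalid_paths_alt path_list policy_paths
instance (path_list : List String) (policy_paths : List String) (out : List String) : Decidable (Spec_list_invalid_paths path_list policy_paths out) := by unfold Spec_list_invalid_paths; infer_instance

-- ===== CLAIM (what is proved, stated in full; the proofs are below) =====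
def Claim_equal_list_invalid_paths : Prop := ∀ (path_list : List String) (policy_paths : List String), Dom_list_invalid_paths path_list policy_paths → Spec_list_invalid_paths path_list policy_paths (list_invalid_paths path_list policy_paths)

-- ===== LEMMAS AND PROOFS =====

-- A prefix of x ++ c :: y that avoids c stops inside x.
theorem pv_prefix_before {α : Type} (c : α) (sub x y : List α)
    (hc : c ∉ sub) (h : sub <+: x ++ c :: y) : sub <+: x := by
  induction sub generalizing x with
  | nil => exact List.nil_prefix
  | cons d sub' ih =>
    have hd : d ≠ c := fun h' => hc (h' ▸ List.mem_cons_self ..)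
    have hc' : c ∉ sub' := fun h' => hc (List.mem_cons_of_mem _ h')
    cases x with
    | nil =>
      rw [List.nil_append, List.cons_prefix_cons] at h
      exact absurd h.1 hd
    | cons a x' =>
      rw [List.cons_append, List.cons_prefix_cons] at h
      exact List.cons_prefix_cons.mpr ⟨h.1, ih x' hc' h.2⟩

-- An occurrence of a c-free sub in x ++ c :: y lies entirely in x or entirely in y.
theorem pv_infix_append_cons {α : Type} (c : α) (sub x y : List α) (hc : c ∉ sub) :
    sub <:+: x ++ c :: y ↔ sub <:+: x ∨ sub <:+: y := by
  constructor
  · intro h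
    induction x with
    | nil =>
      rw [List.nil_append] at h
      rcases List.infix_cons_iff.mp h with hp | hi
      · cases sub with
        | nil => exact Or.inr List.nil_infix
        | cons d sub' =>
          rw [List.cons_prefix_cons] at hp
          exact absurd hp.1 (fun h' => hc (h' ▸ List.mem_cons_self ..))
      · exact Or.inr hi
    | cons a x' ih =>
      rw [List.cons_append] at h
      rcases List.infix_cons_iff.mp h with hp | hi
      · exact Or.inl (pv_prefix_before c sub (a :: x') y hc (by rw [List.cons_append]; exact hp)).isInfix
      · rcases ih hi with h1 | h2
        · exact Or.inl (h1.trans ⟨[a], [], by simp⟩)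
        · exact Or.inr h2
  · rintro (h | h)
    · exact h.trans ⟨[], c :: y, by simp⟩
    · exact h.trans ⟨x ++ [c], [], by simp⟩

-- A c-free sub is an infix of [c].join(parts) iff it is an infix of some part.
theorem pv_infix_join (c : Char) (sub : List Char) (parts : List (List Char))
    (hne : parts ≠ []) (hc : c ∉ sub) :
    (sub <:+: PySem.Chars.join [c] parts) ↔ ∃ p ∈ parts, sub <:+: p := by
  induction parts with
  | nil => exact absurd rfl hne
  | cons p rest ih =>
    cases rest with
    | nil => simp [PySem.Chars.join_singleton]
    | cons q rest' =>
      rw [PySem.Chars.join_cons_cons]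
      have heq : p ++ [c] ++ PySem.Chars.join [c] (q :: rest')
           = p ++ c :: PySem.Chars.join [c] (q :: rest') := by simp
      rw [heq, pv_infix_append_cons c sub _ _ hc, ih (by simp)]
      constructor
      · rintro (h | ⟨r, hr, h⟩)
        · exact ⟨p, List.mem_cons_self .., h⟩
        · exact ⟨r, List.mem_cons_of_mem _ hr, h⟩
      · rintro ⟨r, hr, h⟩
        rcases List.mem_cons.mp hr with rfl | hr'
        · exact Or.inl h
        · exact Or.inr ⟨r, hr', h⟩

-- ===== VERDICT (by name: the statement is the Claim_ definition above) =====
theorem list_invalid_paths_spec : Claim_equal_list_invalid_paths := by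
  intro path_list policy_paths hdom
  unfold Spec_list_invalid_paths list_invalid_paths list_invalid_paths_alt
  rw [PySem.List.foldl_append_if_eq_filter]
  simp only [List.nil_append]
  by_cases hpp : policy_paths = []
  · subst hpp
    simp [pvPolicyContainsPath]
  · rw [if_neg (by simpa using hpp)]
    apply List.filter_congr
    intro path hpath
    congr 1
    rw [Bool.eq_iff_iff]
    have hdom' : pvDomStr path = true := by
      unfold Dom_list_invalid_paths at hdom
      simp at hdom
      exact hdom.1 path hpath
    have hc : '\x00' ∉ path.toList := by
      intro hmem
      have := List.all_eq_true.mp hdom' _ hmem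
      simp [pvDomChar] at this
    have hxt : "\x00".toList = ['\x00'] := rfl
    have hne : policy_paths.map String.toList ≠ [] := by simpa using hpp
    constructor
    · intro h
      rcases List.any_eq_true.mp h with ⟨p, hp, hin⟩
      have hinf : path.toList <:+: p.toList := (PySem.Str.isIn_iff_infix _ _).mp hin
      rw [PySem.Str.isIn_iff_infix, PySem.Str.toList_join, hxt,
        pv_infix_join '\x00' _ _ hne hc]
      exact ⟨p.toList, List.mem_map_of_mem hp, hinf⟩
    · intro h
      rw [PySem.Str.isIn_iff_infix, PySem.Str.toList_join, hxt,
        pv_infix_join '\x00' _ _ hne hc] at h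
      rcases h with ⟨q, hq, hinf⟩
      rcases List.mem_map.mp hq with ⟨p, hp, rfl⟩
      exact List.any_eq_true.mpr ⟨p, hp, (PySem.Str.isIn_iff_infix _ _).mpr hinf⟩
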